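-- pv_equiv track=rewrite | github.com/avsmith/adventofcode | 2016/day18/day18.py | traps
-- ===== SOURCE A (Python) =====
-- def traps(string):
--     new = ""
--     for i in range(len(string)):
--         if i == 0:
--             l = "."
--         else:
--             l = string[i - 1]
--         if i == len(string) - 1:
--             r = "."
--         else:
--             r = string[i + 1]
--         if l == r:
--             new += "."
--         else:
--             new += "^"
--     return new
-- ===== SOURCE B (Python) =====
-- def traps(string):
--     # Divide and conquer: split the row in half and recurse, handing each half
--     # the neighbor characters just outside it; a single cell is resolved by
--     # comparing its two outer neighbors.
--     def rec(l, s, r):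
--         if not s:
--             return ''
--         if len(s) == 1:
--             return '.' if l == r else '^'
--         m = len(s) // 2
--         u, v = s[:m], s[m:]
--         return rec(l, u, v[0]) + rec(u[-1], v, r)
--     return rec('.', string, '.')
-- ===== Notes on version B (the rewrite author's own statement) =====
-- stated objective: alternative
-- what changed: Replaces A's left-to-right index loop with i==0 / i==len-1 boundary branches by a divide-and-conquer recursion that splits the row at the midpoint and passes each half its outer neighbor characters, resolving single cells by comparing their two neighbors.
import Mathlib
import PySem

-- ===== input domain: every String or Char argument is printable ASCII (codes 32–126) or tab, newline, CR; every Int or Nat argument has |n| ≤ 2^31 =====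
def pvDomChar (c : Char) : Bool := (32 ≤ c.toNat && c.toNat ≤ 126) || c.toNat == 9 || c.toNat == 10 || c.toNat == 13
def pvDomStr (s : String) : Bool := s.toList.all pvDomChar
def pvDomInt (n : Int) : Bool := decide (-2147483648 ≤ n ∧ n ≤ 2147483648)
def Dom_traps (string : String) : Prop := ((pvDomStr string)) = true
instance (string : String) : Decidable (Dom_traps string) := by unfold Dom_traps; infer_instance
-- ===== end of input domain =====

-- B replaces A's index loop (with i==0 / i==len-1 boundary branches) by a divide-and-conquer
-- recursion that halves the row and passes each half its outer neighbor characters (alternative; same O(n) cost).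

-- ===== PORT A =====
-- index loop over range(len(string)), building the new row char by char
def traps (string : String) : String :=
  let cs := string.toList
  let n : Int := cs.length
  String.ofList ((PySem.List.pyRange 0 n 1).foldl (fun new i =>
    let l : Char := if i = 0 then '.' else PySem.List.pyGetD cs (i - 1) '.'
    let r : Char := if i = n - 1 then '.' else PySem.List.pyGetD cs (i + 1) '.'
    new ++ [if l = r then '.' else '^']) [])

-- ===== PORT B =====
-- rec(l, s, r): empty → ''; single cell → compare the outer neighbors l, r;
-- otherwise split s at len//2 and recurse, handing each half its boundary neighbors.
-- (fuel = |s| is a totality guard only: the recursion strictly shrinks the list.)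
def trapsRec (fuel : Nat) (l : Char) (s : List Char) (r : Char) : List Char :=
  match fuel with
  | 0 => []
  | fuel + 1 =>
    match s with
    | [] => []
    | [_] => [if l = r then '.' else '^']
    | c1 :: c2 :: rest =>
      let s' := c1 :: c2 :: rest
      let m := s'.length / 2
      let u := s'.take m
      let v := s'.drop m
      trapsRec fuel l u (v.headD '.') ++ trapsRec fuel (u.getLastD '.') v r

def traps_alt (string : String) : String :=
  String.ofList (trapsRec string.toList.length '.' string.toList '.')

-- ===== PRECONDITION & SPEC =====
def Spec_traps (string : String) (out : String) : Prop := out = traps_alt string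
instance (string : String) (out : String) : Decidable (Spec_traps string out) := by unfold Spec_traps; infer_instance

-- ===== CLAIM (what is proved, stated in full; the proofs are below) =====
def Claim_equal_traps : Prop := ∀ (string : String), Dom_traps string → Spec_traps string (traps string)

-- ===== LEMMAS AND PROOFS =====

-- the common pointwise form both ports are reduced to: pad with l, r and zip with the 2-shift
def trapsZip (l : Char) (s : List Char) (r : Char) : List Char :=
  ((l :: s ++ [r]).zip ((l :: s ++ [r]).drop 2)).map (fun p => if p.1 ≠ p.2 then '^' else '.')

theorem trapsZip_nil (l r : Char) : trapsZip l [] r = [] := by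
  simp [trapsZip]

theorem trapsZip_cons (l c : Char) (t : List Char) (r : Char) :
    trapsZip l (c :: t) r
      = (if l ≠ (t ++ [r]).headD '.' then '^' else '.') :: trapsZip c t r := by
  cases t with
  | nil => simp [trapsZip]
  | cons a t2 => simp [trapsZip]

theorem trapsZip_append (u v : List Char) (l r : Char) (hu : u ≠ []) (hv : v ≠ []) :
    trapsZip l (u ++ v) r
      = trapsZip l u (v.headD '.') ++ trapsZip (u.getLastD '.') v r := by
  induction u generalizing l with
  | nil => exact absurd rfl hu
  | cons c u' ih =>
    cases u' with
    | nil =>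
      cases v with
      | nil => exact absurd rfl hv
      | cons a v' =>
        simp only [List.cons_append]
        rw [trapsZip_cons, trapsZip_cons]
        simp [trapsZip_nil]
    | cons b u'' =>
      cases v with
      | nil => exact absurd rfl hv
      | cons a v' =>
        rw [show ((c :: b :: u'' : List Char) ++ a :: v') = c :: ((b :: u'') ++ a :: v') from rfl,
          trapsZip_cons, ih c (by simp)]
        conv_rhs => rw [trapsZip_cons]
        simp

theorem trapsRec_eq_zip_aux (fuel : Nat) : ∀ (l : Char) (s : List Char) (r : Char),
    s.length ≤ fuel → trapsRec fuel l s r = trapsZip l s r := by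
  induction fuel with
  | zero =>
    intro l s r h
    have hs : s = [] := by cases s with | nil => rfl | cons a t => simp at h
    subst hs
    simp [trapsRec, trapsZip_nil]
  | succ n ih =>
    intro l s r h
    match s with
    | [] => simp [trapsRec, trapsZip_nil]
    | [c] =>
      rw [trapsRec, trapsZip_cons]
      simp only [List.nil_append, List.headD_cons, trapsZip_nil]
      by_cases hc : l = r <;> simp [hc]
    | c1 :: c2 :: rest =>
      rw [trapsRec]
      have hlen : (c1 :: c2 :: rest).length = rest.length + 2 := by simp
      have hm1 : 1 ≤ (c1 :: c2 :: rest).length / 2 := by omega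
      have hm2 : (c1 :: c2 :: rest).length / 2 < (c1 :: c2 :: rest).length := by omega
      have hul : ((c1 :: c2 :: rest).take ((c1 :: c2 :: rest).length / 2)).length ≤ n := by
        rw [List.length_take]
        simp only [List.length_cons] at h ⊢
        omega
      have hvl : ((c1 :: c2 :: rest).drop ((c1 :: c2 :: rest).length / 2)).length ≤ n := by
        rw [List.length_drop]
        simp only [List.length_cons] at h ⊢
        omega
      rw [ih _ _ _ hul, ih _ _ _ hvl]
      have hu : (c1 :: c2 :: rest).take ((c1 :: c2 :: rest).length / 2) ≠ [] := by
        simp only [ne_eq, ← List.length_eq_zero_iff, List.length_take]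
        omega
      have hv : (c1 :: c2 :: rest).drop ((c1 :: c2 :: rest).length / 2) ≠ [] := by
        simp only [ne_eq, ← List.length_eq_zero_iff, List.length_drop]
        omega
      rw [← trapsZip_append _ _ _ _ hu hv, List.take_append_drop]

theorem trapsRec_eq_zip (l : Char) (s : List Char) (r : Char) :
    trapsRec s.length l s r = trapsZip l s r :=
  trapsRec_eq_zip_aux s.length l s r le_rfl

-- A's fold equals the same padded-zip form (proved pointwise)
theorem traps_lists_eq (cs : List Char) :
    ((PySem.List.pyRange 0 (cs.length : Int) 1).foldl (fun new i =>
      let l : Char := if i = 0 then '.' else PySem.List.pyGetD cs (i - 1) '.'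
      let r : Char := if i = (cs.length : Int) - 1 then '.' else PySem.List.pyGetD cs (i + 1) '.'
      new ++ [if l = r then '.' else '^']) [])
    = trapsZip '.' cs '.' := by
  unfold trapsZip
  rw [PySem.List.foldl_append_singleton_eq_map, PySem.List.pyRange_one]
  apply List.ext_getElem
  · simp [List.length_zip]; omega
  · intro k h1 h2
    have hk : k < cs.length := by
      simp only [List.nil_append, List.length_map, List.length_range] at h1; omega
    simp only [List.nil_append, List.getElem_map, List.getElem_range, List.getElem_zip,
      List.getElem_drop]
    have hl : (if ((0:Int) + (k:Int)) = 0 then '.' else PySem.List.pyGetD cs (((0:Int) + (k:Int)) - 1) '.')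
        = ('.' :: cs ++ ['.'])[k]'(by simp; omega) := by
      rcases k with _ | j
      · simp
      · have hne : ((0:Int) + ((j+1 : Nat):Int)) ≠ 0 := by push_cast; omega
        rw [if_neg hne]
        have hj : j < cs.length := by omega
        have e : ((0:Int) + ((j+1 : Nat):Int)) - 1 = ((j : Nat) : Int) := by push_cast; ring
        rw [e, PySem.List.pyGetD_natCast, List.getD_eq_getElem _ _ hj]
        simp [List.getElem_cons_succ, List.getElem_append_left hj]
    have hr : (if ((0:Int) + (k:Int)) = (cs.length : Int) - 1 then '.'
          else PySem.List.pyGetD cs (((0:Int) + (k:Int)) + 1) '.')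
        = ('.' :: cs ++ ['.'])[2 + k]'(by simp; omega) := by
      have e1 : ('.' :: cs ++ ['.'])[2 + k]'(by simp; omega)
          = (cs ++ ['.'])[1 + k]'(by simp; omega) := by
        simp only [show 2 + k = (1 + k) + 1 from by omega, show 1 + k = k + 1 from by omega]
        simp
      rw [e1]
      by_cases hlast : k = cs.length - 1
      · have hp : ((0:Int) + (k:Int)) = (cs.length : Int) - 1 := by omega
        rw [if_pos hp]
        have h1k : 1 + k = cs.length := by omega
        have : (cs ++ ['.'])[1 + k]'(by simp; omega) = (cs ++ ['.'])[cs.length]'(by simp) := by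
          simp only [h1k]
        rw [this, List.getElem_append_right (by omega)]
        simp
      · have hne : ((0:Int) + (k:Int)) ≠ (cs.length : Int) - 1 := by omega
        rw [if_neg hne]
        have h1k : 1 + k < cs.length := by omega
        have e : ((0:Int) + (k:Int)) + 1 = ((1 + k : Nat) : Int) := by push_cast; ring
        rw [e, PySem.List.pyGetD_natCast, List.getD_eq_getElem _ _ h1k]
        simp [List.getElem_append_left h1k]
    rw [hl, hr]
    split_ifs <;> simp_all

-- ===== VERDICT (by name: the statement is the Claim_ definition above) =====
theorem traps_spec : Claim_equal_traps := by
  intro s _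
  unfold Spec_traps traps traps_alt
  simp only []
  rw [traps_lists_eq, trapsRec_eq_zip]
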